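-- pv_equiv track=rewrite | github.com/VALERIO-CALCAGNI/python-codice-fiscale | main.py | calc_cognome
-- ===== SOURCE A (Python) =====
-- vocali = ['A', 'E', 'I', 'O', 'U', 'a', 'e', 'i', 'o', 'u']
--
-- def calc_cognome(cognome):
--     cons = []
--     voc = []
--     for i in cognome:
--         if i not in vocali:
--             cons.append(i)
--         else:
--             voc.append(i)
--     cod = "".join(cons + voc +['x']*2)[0:3] #Nel caso in cui un cognome abbia meno di tre lettere, la parte di codice viene completata aggiungendo la X (per esempio: Fo → FOX)
--
--     return cod
-- ===== SOURCE B (Python) =====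
-- vocali = ['A', 'E', 'I', 'O', 'U', 'a', 'e', 'i', 'o', 'u']
--
-- def calc_cognome(cognome):
--     # Early-exit scans: return as soon as three code letters are in hand.
--     # First scan picks consonants only (the common case returns here without
--     # ever touching vowels); a second scan picks vowels only if needed;
--     # finally pad with "xx" and cut to three.
--     out = []
--     for ch in cognome:
--         if ch not in vocali:
--             out.append(ch)
--             if len(out) == 3:
--                 return "".join(out)
--     for ch in cognome:
--         if ch in vocali:
--             out.append(ch)
--             if len(out) == 3:
--                 return "".join(out)
--     return ("".join(out) + "xx")[0:3]
-- ===== Notes on version B (the rewrite author's own statement) =====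
-- stated objective: faster
-- what changed: Replaces A's full two-list partition + join + slice with early-exit scans: a consonant-only pass that returns as soon as three letters are collected (so the rest of the string is never read and no vowel list is ever built in the common case), a vowel-only pass with the same early return only when needed, and a pad-and-cut fallback for very short surnames.
import Mathlib
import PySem

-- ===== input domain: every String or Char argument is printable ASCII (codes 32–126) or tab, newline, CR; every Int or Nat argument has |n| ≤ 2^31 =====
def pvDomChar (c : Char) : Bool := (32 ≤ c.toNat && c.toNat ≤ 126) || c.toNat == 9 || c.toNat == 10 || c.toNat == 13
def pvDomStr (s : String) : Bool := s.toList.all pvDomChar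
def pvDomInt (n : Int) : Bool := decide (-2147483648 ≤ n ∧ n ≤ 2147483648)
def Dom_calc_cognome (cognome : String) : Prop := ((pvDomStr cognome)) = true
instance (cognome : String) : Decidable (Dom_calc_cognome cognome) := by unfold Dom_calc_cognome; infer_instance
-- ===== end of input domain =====

-- B replaces A's full partition+join+slice with early-exit scans (consonants first, vowels only if needed); same values.

-- ===== PORT A =====
def vocali : List Char := ['A', 'E', 'I', 'O', 'U', 'a', 'e', 'i', 'o', 'u']

-- "".join over chars is String.ofList of the char list (exact on this domain).
def calc_cognome (cognome : String) : String :=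
  let st := cognome.toList.foldl
    (fun (s : List Char × List Char) i =>
      if i ∉ vocali then (s.1 ++ [i], s.2) else (s.1, s.2 ++ [i]))
    ([], [])
  PySem.Str.slice (String.ofList (st.1 ++ st.2 ++ PySem.List.pyRepeat ['x'] 2)) (some 0) (some 3)

-- ===== PORT B =====
-- first loop of Source B: append consonants, early-return (Sum.inl) once len == 3
def calc_cognome_loop1 (acc : List Char) : List Char → String ⊕ List Char
  | [] => Sum.inr acc
  | c :: cs =>
    if c ∉ vocali then
      let acc' := acc ++ [c]
      if acc'.length == 3 then Sum.inl (String.ofList acc') else calc_cognome_loop1 acc' cs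
    else calc_cognome_loop1 acc cs

-- second loop of Source B: append vowels, same early return
def calc_cognome_loop2 (acc : List Char) : List Char → String ⊕ List Char
  | [] => Sum.inr acc
  | c :: cs =>
    if c ∈ vocali then
      let acc' := acc ++ [c]
      if acc'.length == 3 then Sum.inl (String.ofList acc') else calc_cognome_loop2 acc' cs
    else calc_cognome_loop2 acc cs

def calc_cognome_alt (cognome : String) : String :=
  match calc_cognome_loop1 [] cognome.toList with
  | Sum.inl r => r
  | Sum.inr out =>
    match calc_cognome_loop2 out cognome.toList with
    | Sum.inl r => r
    | Sum.inr out' => PySem.Str.slice (String.ofList (out' ++ "xx".toList)) (some 0) (some 3)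

-- ===== PRECONDITION & SPEC =====
def Spec_calc_cognome (cognome : String) (out : String) : Prop := out = calc_cognome_alt cognome
instance (cognome : String) (out : String) : Decidable (Spec_calc_cognome cognome out) := by unfold Spec_calc_cognome; infer_instance

-- ===== CLAIM (what is proved, stated in full; the proofs are below) =====
def Claim_equal_calc_cognome : Prop := ∀ (cognome : String), Dom_calc_cognome cognome → Spec_calc_cognome cognome (calc_cognome cognome)

-- ===== LEMMAS AND PROOFS =====

-- A's loop computes exactly the two filters.
theorem foldl_part (xs : List Char) :
    ∀ (A B : List Char),
    xs.foldl
      (fun (s : List Char × List Char) i =>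
        if i ∉ vocali then (s.1 ++ [i], s.2) else (s.1, s.2 ++ [i]))
      (A, B)
      = (A ++ xs.filter (fun c => !decide (c ∈ vocali)), B ++ xs.filter (fun c => decide (c ∈ vocali))) := by
  induction xs with
  | nil => intro A B; simp
  | cons x xs ih =>
    intro A B
    rw [List.foldl_cons]
    by_cases hx : x ∈ vocali
    · rw [if_neg (not_not_intro hx)]
      show List.foldl _ (A, B ++ [x]) xs = _
      rw [ih]; simp [hx, List.append_assoc]
    · rw [if_pos hx]
      show List.foldl _ (A ++ [x], B) xs = _
      rw [ih]; simp [hx, List.append_assoc]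

-- characterisation of loop1: early return = take 3, otherwise acc ++ consonant filter
theorem loop1_spec (xs : List Char) : ∀ (acc : List Char), acc.length < 3 →
    calc_cognome_loop1 acc xs =
      if 3 ≤ acc.length + (xs.filter (fun c => !decide (c ∈ vocali))).length
      then Sum.inl (String.ofList (List.take 3 (acc ++ xs.filter (fun c => !decide (c ∈ vocali)))))
      else Sum.inr (acc ++ xs.filter (fun c => !decide (c ∈ vocali))) := by
  induction xs with
  | nil => intro acc h; simp [calc_cognome_loop1]; omega
  | cons x xs ih =>
    intro acc h
    by_cases hx : x ∈ vocali
    · simp only [calc_cognome_loop1, if_neg (not_not_intro hx)]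
      rw [ih acc h]; simp [hx]
    · simp only [calc_cognome_loop1, if_pos hx]
      by_cases h3 : (acc ++ [x]).length = 3
      · have : ((acc ++ [x]).length == 3) = true := by simp [h3]
        rw [if_pos this]
        have hfilter : (x :: xs).filter (fun c => !decide (c ∈ vocali))
            = x :: xs.filter (fun c => !decide (c ∈ vocali)) := by simp [hx]
        rw [hfilter]
        have hlen : 3 ≤ acc.length + (x :: xs.filter (fun c => !decide (c ∈ vocali))).length := by
          simp at h3 ⊢; omega
        rw [if_pos hlen]
        have : List.take 3 (acc ++ x :: xs.filter (fun c => !decide (c ∈ vocali)))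
            = acc ++ [x] := by
          have : acc ++ x :: xs.filter (fun c => !decide (c ∈ vocali))
              = (acc ++ [x]) ++ xs.filter (fun c => !decide (c ∈ vocali)) := by simp
          rw [this, List.take_append_of_le_length (by omega), List.take_of_length_le (by omega)]
        rw [this]
      · rw [if_neg (by simp at h3 ⊢; omega)]
        have h' : (acc ++ [x]).length < 3 := by simp at h3 ⊢; omega
        rw [ih (acc ++ [x]) h']
        have heq : acc.length + 1 + (xs.filter (fun c => !decide (c ∈ vocali))).length
            = acc.length + ((xs.filter (fun c => !decide (c ∈ vocali))).length + 1) := by omega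
        simp [hx, heq]

-- same characterisation for loop2 with the vowel filter
theorem loop2_spec (xs : List Char) : ∀ (acc : List Char), acc.length < 3 →
    calc_cognome_loop2 acc xs =
      if 3 ≤ acc.length + (xs.filter (fun c => decide (c ∈ vocali))).length
      then Sum.inl (String.ofList (List.take 3 (acc ++ xs.filter (fun c => decide (c ∈ vocali)))))
      else Sum.inr (acc ++ xs.filter (fun c => decide (c ∈ vocali))) := by
  induction xs with
  | nil => intro acc h; simp [calc_cognome_loop2]; omega
  | cons x xs ih =>
    intro acc h
    by_cases hx : x ∈ vocali
    · simp only [calc_cognome_loop2, if_pos hx]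
      by_cases h3 : (acc ++ [x]).length = 3
      · rw [if_pos (by simp [h3])]
        have hfilter : (x :: xs).filter (fun c => decide (c ∈ vocali))
            = x :: xs.filter (fun c => decide (c ∈ vocali)) := by simp [hx]
        rw [hfilter]
        have hlen : 3 ≤ acc.length + (x :: xs.filter (fun c => decide (c ∈ vocali))).length := by
          simp at h3 ⊢; omega
        rw [if_pos hlen]
        have : List.take 3 (acc ++ x :: xs.filter (fun c => decide (c ∈ vocali)))
            = acc ++ [x] := by
          have : acc ++ x :: xs.filter (fun c => decide (c ∈ vocali))
              = (acc ++ [x]) ++ xs.filter (fun c => decide (c ∈ vocali)) := by simp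
          rw [this, List.take_append_of_le_length (by omega), List.take_of_length_le (by omega)]
        rw [this]
      · rw [if_neg (by simp at h3 ⊢; omega)]
        have h' : (acc ++ [x]).length < 3 := by simp at h3 ⊢; omega
        rw [ih (acc ++ [x]) h']
        have heq : acc.length + 1 + (xs.filter (fun c => decide (c ∈ vocali))).length
            = acc.length + ((xs.filter (fun c => decide (c ∈ vocali))).length + 1) := by omega
        simp [hx, List.append_assoc, heq]
    · simp only [calc_cognome_loop2, if_neg hx]
      rw [ih acc h]; simp [hx]

-- the slice [0:3] is a take 3 over the char list
theorem slice03 (l : List Char) :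
    PySem.Str.slice (String.ofList l) (some 0) (some 3) = String.ofList (List.take 3 l) := by
  have h3 : ((3:Int) : Int) = ((3:Nat) : Int) := by norm_num
  simp [PySem.Str.slice, PySem.Chars.slice_eq_listSlice]
  rw [show ((3:Int)) = ((3:Nat):Int) from rfl, PySem.List.slice_to_natCast]

-- ===== VERDICT (by name: the statement is the Claim_ definition above) =====
theorem calc_cognome_spec : Claim_equal_calc_cognome := by
  intro cognome _
  unfold Spec_calc_cognome calc_cognome calc_cognome_alt
  rw [foldl_part, loop1_spec _ [] (by norm_num)]
  simp only [List.nil_append, List.length_nil, Nat.zero_add]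
  by_cases h1 : 3 ≤ (cognome.toList.filter (fun c => !decide (c ∈ vocali))).length
  · rw [if_pos h1]
    dsimp only
    rw [slice03]
    congr 1
    rw [List.append_assoc, List.take_append_of_le_length h1]
  · rw [if_neg h1]
    dsimp only
    rw [loop2_spec cognome.toList _ (by omega)]
    by_cases h2 : 3 ≤ (cognome.toList.filter (fun c => !decide (c ∈ vocali))).length
        + (cognome.toList.filter (fun c => decide (c ∈ vocali))).length
    · rw [if_pos h2]
      dsimp only
      rw [slice03]
      congr 1
      rw [List.append_assoc _ _ (PySem.List.pyRepeat ['x'] 2), ← List.append_assoc]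
      rw [List.take_append_of_le_length (by simp; omega)]
    · rw [if_neg h2]
      dsimp only
      rw [slice03, slice03]
      congr 1
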